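-- pv_equiv track=rewrite | github.com/c788630/Numclass | src/numclass/classifiers/conjectures.py | _znam_verify_full
-- ===== SOURCE A (Python) =====
-- from math import ceil, prod
--
-- def _znam_verify_full(S: list[int], proper: bool) -> bool:
--     """
--     Verify Znám condition for every t in S:
--       t | (P/t) + 1  and (if proper)  t < (P/t) + 1
--     """
--     P = prod(S)
--     for t in S:
--         other = P // t
--         val = other + 1
--         if val % t != 0:
--             return False
--         if proper and not (t < val):
--             return False
--     return True
-- ===== SOURCE B (Python) =====
-- def _znam_verify_full(S: list[int], proper: bool) -> bool:
--     """
--     Verify Znám condition for every t in S using prefix/suffix products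
--     (no big-integer division): product of all other elements at index i
--     is prefix[i] * suffix[i+1].
--     """
--     n = len(S)
--     prefix = [1] * (n + 1)
--     for i in range(n):
--         prefix[i + 1] = prefix[i] * S[i]
--     suffix = [1] * (n + 1)
--     for i in range(n - 1, -1, -1):
--         suffix[i] = suffix[i + 1] * S[i]
--     for i, t in enumerate(S):
--         val = prefix[i] * suffix[i + 1] + 1
--         if val % t != 0:
--             return False
--         if proper and t >= val:
--             return False
--     return True
-- ===== Notes on version B (the rewrite author's own statement) =====
-- stated objective: alternative
-- what changed: Replaces the single total product plus per-element big-integer floor division with prefix-product and suffix-product tables built in two passes, so each 'product of all others' is one multiplication prefix[i]*suffix[i+1] and no division occurs.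
import Mathlib
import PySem

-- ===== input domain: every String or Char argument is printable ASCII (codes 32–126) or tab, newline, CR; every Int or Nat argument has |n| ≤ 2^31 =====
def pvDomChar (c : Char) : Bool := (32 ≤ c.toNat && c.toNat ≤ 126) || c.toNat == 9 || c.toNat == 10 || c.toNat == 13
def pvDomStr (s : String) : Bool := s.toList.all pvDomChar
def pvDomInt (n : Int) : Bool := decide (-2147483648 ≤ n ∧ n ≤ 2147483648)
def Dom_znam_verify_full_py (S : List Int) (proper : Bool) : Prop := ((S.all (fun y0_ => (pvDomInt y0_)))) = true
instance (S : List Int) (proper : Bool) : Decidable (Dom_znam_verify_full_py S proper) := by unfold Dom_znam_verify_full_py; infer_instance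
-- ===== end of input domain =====

-- B replaces A's total product and per-element big-integer floor division by prefix/suffix
-- product tables, so the "product of the others" is a single multiplication (alternative, no division).

-- ===== PORT A =====
-- the for-loop of _znam_verify_full, with P fixed
def znamLoopA (P : Int) (proper : Bool) : List Int → Bool
  | [] => true
  | t :: rest =>
    let other := PySem.Int.floordiv P t
    let val := other + 1
    if PySem.Int.mod val t ≠ 0 then false
    else if proper && !(decide (t < val)) then false
    else znamLoopA P proper rest

def znam_verify_full_py (S : List Int) (proper : Bool) : Bool :=
  znamLoopA S.prod proper S   -- P = prod(S)

-- ===== PORT B =====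
-- forward pass: prefix[i] = product of S[0..i-1] (n+1 entries, acc threads the running product)
def buildPrefix (acc : Int) : List Int → List Int
  | [] => [acc]
  | t :: rest => acc :: buildPrefix (acc * t) rest

-- backward pass: suffix[i] = product of S[i..]; backward fill = cons at the front
def buildSuffix : List Int → List Int
  | [] => [1]
  | t :: rest =>
    let s := buildSuffix rest
    (t * s.headD 1) :: s

-- final loop over (t, prefix[i], suffix[i+1])
def znamCheckB (proper : Bool) : List (Int × Int × Int) → Bool
  | [] => true
  | (t, p, s) :: rest =>
    let val := p * s + 1
    if PySem.Int.mod val t ≠ 0 then false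
    else if proper && decide (t ≥ val) then false
    else znamCheckB proper rest

def znam_verify_full_py_alt (S : List Int) (proper : Bool) : Bool :=
  let pre := buildPrefix 1 S
  let suf := buildSuffix S
  znamCheckB proper (S.zip (pre.zip (suf.drop 1)))

-- ===== PRECONDITION & SPEC =====
-- Pre_ excludes exactly the inputs on which A raises ZeroDivisionError (it reaches a zero element
-- without an earlier `return False`, i.e. 0 ∈ S and every element before the first 0 passes the
-- trivial check: it is ±1, and -1 when proper); B raises ZeroDivisionError there too.
def Pre_znam_verify_full_py (S : List Int) (proper : Bool) : Prop :=
  ¬ ((0 : Int) ∈ S ∧ ∀ t ∈ S.takeWhile (fun x => x != 0), ((proper = true → t < 1) ∧ (t = 1 ∨ t = -1)))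
instance (S : List Int) (proper : Bool) : Decidable (Pre_znam_verify_full_py S proper) := by unfold Pre_znam_verify_full_py; infer_instance

def pvWitness_znam_verify_full_py : List Int × Bool := ([2, 3, 7, 43], true)

def Spec_znam_verify_full_py (S : List Int) (proper : Bool) (out : Bool) : Prop := out = znam_verify_full_py_alt S proper
instance (S : List Int) (proper : Bool) (out : Bool) : Decidable (Spec_znam_verify_full_py S proper out) := by unfold Spec_znam_verify_full_py; infer_instance

-- ===== CLAIM (what is proved, stated in full; the proofs are below) =====
def Claim_equal_znam_verify_full_py : Prop := ∀ (S : List Int) (proper : Bool), Dom_znam_verify_full_py S proper → Pre_znam_verify_full_py S proper → Spec_znam_verify_full_py S proper (znam_verify_full_py S proper)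

-- ===== LEMMAS AND PROOFS =====

theorem buildSuffix_headD (S : List Int) : (buildSuffix S).headD 1 = S.prod := by
  induction S with
  | nil => simp [buildSuffix]
  | cons t rest ih => simp only [buildSuffix, List.headD_cons, ih, List.prod_cons]

theorem buildSuffix_cons (t : Int) (rest : List Int) :
    buildSuffix (t :: rest) = (t * rest.prod) :: buildSuffix rest := by
  simp only [buildSuffix, buildSuffix_headD]

theorem buildSuffix_eq_tail (S : List Int) :
    buildSuffix S = S.prod :: (buildSuffix S).tail := by
  cases S with
  | nil => simp [buildSuffix]
  | cons t rest => rw [buildSuffix_cons]; simp [List.prod_cons]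

theorem znam_main (proper : Bool) (P : Int) :
    ∀ (S : List Int) (acc : Int), Pre_znam_verify_full_py S proper → P = acc * S.prod →
      znamLoopA P proper S =
        znamCheckB proper (S.zip ((buildPrefix acc S).zip ((buildSuffix S).drop 1))) := by
  intro S
  induction S with
  | nil => intro acc _ _; simp [znamLoopA, buildPrefix, buildSuffix, znamCheckB]
  | cons t rest ih =>
    intro acc hpre hP
    have ht : t ≠ 0 := by
      intro h
      exact hpre ⟨by simp [h], by simp [h, List.takeWhile]⟩
    have hdiv : PySem.Int.floordiv P t = acc * rest.prod := by
      have : P = t * (acc * rest.prod) := by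
        rw [hP, List.prod_cons]; ring
      rw [this]
      show (t * (acc * rest.prod)).fdiv t = acc * rest.prod
      exact Int.mul_fdiv_cancel_left _ ht
    have hz : (t :: rest).zip ((buildPrefix acc (t :: rest)).zip ((buildSuffix (t :: rest)).drop 1))
        = (t, acc, rest.prod) :: rest.zip ((buildPrefix (acc * t) rest).zip ((buildSuffix rest).drop 1)) := by
      rw [buildSuffix_cons]
      simp only [List.drop_one, List.tail_cons, buildPrefix]
      rw [buildSuffix_eq_tail rest]
      simp [List.zip_cons_cons]
    rw [hz]
    simp only [znamLoopA, znamCheckB, hdiv]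
    have hcond : (proper && !(decide (t < acc * rest.prod + 1)))
               = (proper && decide (t ≥ acc * rest.prod + 1)) := by
      by_cases h : t < acc * rest.prod + 1 <;> simp [h] <;> omega
    rw [hcond]
    split_ifs with h1 h2
    · rfl
    · rfl
    · -- both checks passed: the recursion continues, so rest cannot make A raise
      apply ih (acc * t) _ (by rw [hP, List.prod_cons]; ring)
      intro ⟨h0, hu⟩
      have hprod0 : rest.prod = 0 := List.prod_eq_zero h0
      have hval1 : acc * rest.prod + 1 = 1 := by rw [hprod0]; ring
      have hdvd : t ∣ 1 := by
        rw [hval1] at h1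
        exact (PySem.Int.mod_eq_zero_iff_dvd 1 t).mp (not_not.mp (by simpa using h1))
      have hunit : t = 1 ∨ t = -1 := Int.isUnit_iff.mp (isUnit_of_dvd_one hdvd) |>.imp id id
      have hlt : proper = true → t < 1 := by
        intro hp
        rw [hval1] at h2
        simp [hp] at h2
        omega
      exact hpre ⟨List.mem_cons_of_mem _ h0,
        by
          have htw : (t :: rest).takeWhile (fun x => x != 0) = t :: rest.takeWhile (fun x => x != 0) := by
            have hb : (t != 0) = true := by simpa using ht
            simp [List.takeWhile, hb]
          rw [htw]
          intro u hu'
          rcases List.mem_cons.mp hu' with h | h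
          · exact h ▸ ⟨hlt, hunit⟩
          · exact hu u h⟩

-- ===== VERDICT (by name: the statement is the Claim_ definition above) =====
theorem znam_verify_full_py_spec : Claim_equal_znam_verify_full_py := by
  intro S proper _ hpre
  unfold Spec_znam_verify_full_py znam_verify_full_py znam_verify_full_py_alt
  exact znam_main proper S.prod S 1 hpre (by ring)
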